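-- pv_equiv track=rewrite | github.com/thanhnguyen2187/random-problem-solving | online-test-01/task_2.py | solution
-- ===== SOURCE A (Python) =====
-- def solution(n):
--     d = [0] * 30
--     l = 0
--     while n > 0:
--         d[l] = n % 2
--         n //= 2
--         l += 1
--     for p in range(l // 2 + 1, 0, -1):
--         ok = True
--         for i in range(l - p):
--             if d[i] != d[i + p]:
--                 ok = False
--                 break
--         if ok:
--             return p
--     return -1
-- ===== SOURCE B (Python) =====
-- def solution(n):
--     if n <= 0:
--         return 1
--     l = n.bit_length()
--     for p in range(l // 2 + 1, 0, -1):
--         if n // 2 ** p == n % 2 ** (l - p):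
--             return p
--     return -1
-- ===== Notes on version B (the rewrite author's own statement) =====
-- stated objective: alternative
-- what changed: B drops the fixed-size digit array and the inner bit-comparison loop entirely: it tests each candidate period p by a single arithmetic identity (the high bits shifted down equal the low bits kept by a modulus) on the integer itself, using its bit length.
-- outside the precondition, e.g. on solution(1073741824): A raises IndexError, B returns -1
import Mathlib
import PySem

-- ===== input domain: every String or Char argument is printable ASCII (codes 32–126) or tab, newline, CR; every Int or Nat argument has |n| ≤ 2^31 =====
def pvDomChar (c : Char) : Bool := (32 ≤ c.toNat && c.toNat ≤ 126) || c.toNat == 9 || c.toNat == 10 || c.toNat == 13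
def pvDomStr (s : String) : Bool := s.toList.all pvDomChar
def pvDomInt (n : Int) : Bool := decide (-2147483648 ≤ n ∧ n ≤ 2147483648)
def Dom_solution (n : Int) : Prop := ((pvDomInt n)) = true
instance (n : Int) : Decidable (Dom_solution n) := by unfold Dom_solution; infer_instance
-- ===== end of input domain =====

-- B replaces A's 30-slot digit array and inner bit-by-bit comparison loop with one
-- arithmetic identity per candidate period (n // 2^p == n % 2^(l-p)); alternative decomposition.


-- ===== PORT A =====
-- while n > 0: d[l] = n % 2; n //= 2; l += 1
def solutionBuild (n : Int) (d : List Int) (l : Nat) : List Int × Nat :=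
  if h : 0 < n then
    solutionBuild (PySem.Int.floordiv n 2) (d.set l (PySem.Int.mod n 2)) (l + 1)
  else (d, l)
termination_by n.toNat
decreasing_by
  have h2 : PySem.Int.floordiv n 2 = n / 2 := PySem.Int.floordiv_eq_ediv_of_pos (by omega)
  rw [h2]; omega

-- for i in range(l - p): if d[i] != d[i + p]: ok = False; break
def solutionCheck (d : List Int) (p : Nat) (i stop : Nat) : Bool :=
  if i < stop then
    if d.getD i 0 ≠ d.getD (i + p) 0 then false
    else solutionCheck d p (i + 1) stop
  else true
termination_by stop - i

-- for p in range(l // 2 + 1, 0, -1): … ; return -1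
def solutionOuter (d : List Int) (l : Nat) (p : Nat) : Int :=
  match p with
  | 0 => -1
  | q + 1 => if solutionCheck d (q + 1) 0 (l - (q + 1)) then ((q + 1 : Nat) : Int)
             else solutionOuter d l q

def solution (n : Int) : Int :=
  let r := solutionBuild n (List.replicate 30 0) 0
  solutionOuter r.1 r.2 (r.2 / 2 + 1)

-- ===== PORT B =====
-- for p in range(l // 2 + 1, 0, -1): if n // 2 ** p == n % 2 ** (l - p): return p
def solutionAltLoop (n : Int) (l : Nat) (p : Nat) : Int :=
  match p with
  | 0 => -1
  | q + 1 => if PySem.Int.floordiv n (2 ^ (q + 1)) = PySem.Int.mod n (2 ^ (l - (q + 1)))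
             then ((q + 1 : Nat) : Int)
             else solutionAltLoop n l q

-- n.bit_length() is ported as PySem.Int.bitLength (exact)
def solution_alt (n : Int) : Int :=
  if n ≤ 0 then 1
  else
    let l := PySem.Int.bitLength n
    solutionAltLoop n l (l / 2 + 1)

-- ===== PRECONDITION & SPEC =====
-- Pre_ excludes n ≥ 1073741824, where the fixed-size digit array in A overflows and A raises IndexError.
def Pre_solution (n : Int) : Prop := n < 1073741824
instance (n : Int) : Decidable (Pre_solution n) := by unfold Pre_solution; infer_instance
def pvWitness_solution : Int := 6

def Spec_solution (n : Int) (out : Int) : Prop := out = solution_alt n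
instance (n : Int) (out : Int) : Decidable (Spec_solution n out) := by unfold Spec_solution; infer_instance

-- ===== CLAIM (what is proved, stated in full; the proofs are below) =====
def Claim_equal_solution : Prop := ∀ (n : Int), Dom_solution n → Pre_solution n → Spec_solution n (solution n)



-- ===== LEMMAS AND PROOFS =====

theorem solutionBuild_spec (m : Nat) : ∀ (d : List Int) (l : Nat),
    l + PySem.Int.bitLength (m : Int) ≤ d.length →
    (solutionBuild (m : Int) d l).2 = l + PySem.Int.bitLength (m : Int) ∧
    (solutionBuild (m : Int) d l).1.length = d.length ∧
    ∀ i, (solutionBuild (m : Int) d l).1.getD i 0 =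
      if l ≤ i ∧ i < l + PySem.Int.bitLength (m : Int) then ((m / 2 ^ (i - l) % 2 : Nat) : Int)
      else d.getD i 0 := by
  induction m using Nat.strong_induction_on with
  | _ m IH =>
    intro d l hlen
    by_cases hpos : 0 < (m : Int)
    · have hmpos : 0 < m := by omega
      have hfd : PySem.Int.floordiv (m : Int) 2 = ((m / 2 : Nat) : Int) := by
        exact_mod_cast PySem.Int.floordiv_natCast m 2
      have hmd : PySem.Int.mod (m : Int) 2 = ((m % 2 : Nat) : Int) := by
        exact_mod_cast PySem.Int.mod_natCast m 2
      have hbl : PySem.Int.bitLength (m : Int) = PySem.Int.bitLength ((m / 2 : Nat) : Int) + 1 :=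
        PySem.Int.bitLength_natCast hmpos
      rw [solutionBuild, dif_pos hpos, hfd, hmd]
      have hlt : m / 2 < m := Nat.div_lt_self hmpos one_lt_two
      have hlen' : (l + 1) + PySem.Int.bitLength ((m / 2 : Nat) : Int)
          ≤ (d.set l ((m % 2 : Nat) : Int)).length := by
        rw [List.length_set]; omega
      obtain ⟨h2, hlenr, hget⟩ := IH (m / 2) hlt (d.set l ((m % 2 : Nat) : Int)) (l + 1) hlen'
      have hlld : l < d.length := by omega
      refine ⟨by rw [h2, hbl]; omega, by rw [hlenr, List.length_set], ?_⟩
      intro i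
      have hset : (d.set l ((m % 2 : Nat) : Int)).getD i 0
          = if l = i then ((m % 2 : Nat) : Int) else d.getD i 0 := by
        by_cases hli : l = i
        · rw [List.getD_eq_getElem?_getD, List.getElem?_set, if_pos hli, if_pos hlld,
            if_pos hli]
          rfl
        · rw [List.getD_eq_getElem?_getD, List.getElem?_set, if_neg hli, if_neg hli,
            ← List.getD_eq_getElem?_getD]
      rw [hget i, hset, hbl]
      by_cases hi1 : l = i
      · subst hi1
        rw [if_neg (by omega), if_pos rfl, if_pos ⟨le_refl l, by omega⟩]
        simp
      · by_cases hi2 : l + 1 ≤ i ∧ i < l + 1 + PySem.Int.bitLength ((m / 2 : Nat) : Int)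
        · rw [if_pos hi2, if_pos (by omega)]
          have h2p : 2 * 2 ^ (i - (l + 1)) = 2 ^ (i - l) := by
            rw [← pow_succ']
            congr 1
            omega
          rw [Nat.div_div_eq_div_mul, h2p]
        · rw [if_neg hi2, if_neg hi1, if_neg (by omega)]
    · have hz : m = 0 := by omega
      subst hz
      rw [solutionBuild, dif_neg hpos]
      refine ⟨by simp [PySem.Int.bitLength_zero], by rfl, ?_⟩
      intro i
      rw [Nat.cast_zero, PySem.Int.bitLength_zero, if_neg (by omega)]

theorem solutionCheck_iff (d : List Int) (p : Nat) : ∀ (k i stop : Nat), stop - i = k →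
    (solutionCheck d p i stop = true ↔ ∀ j, i ≤ j → j < stop → d.getD j 0 = d.getD (j + p) 0) := by
  intro k
  induction k with
  | zero =>
    intro i stop hk
    rw [solutionCheck, if_neg (by omega)]
    simp only [true_iff]
    intro j h1 h2
    omega
  | succ k IH =>
    intro i stop hk
    rw [solutionCheck, if_pos (by omega)]
    by_cases hne : d.getD i 0 ≠ d.getD (i + p) 0
    · rw [if_pos hne]
      refine iff_of_false (by simp) ?_
      intro hall
      exact hne (hall i (le_refl i) (by omega))
    · rw [if_neg hne, IH (i + 1) stop (by omega)]
      rw [not_not] at hne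
      constructor
      · intro h j h1 h2
        rcases Nat.eq_or_lt_of_le h1 with h1 | h1
        · subst h1; exact hne
        · exact h j h1 h2
      · intro h j h1 h2
        exact h j (by omega) h2

theorem period_arith (m l p : Nat) (hm : m < 2 ^ l) (_hp : 1 ≤ p) (hpl : p ≤ l) :
    m / 2 ^ p = m % 2 ^ (l - p) ↔ ∀ i, i < l - p → m / 2 ^ i % 2 = m / 2 ^ (i + p) % 2 := by
  constructor
  · intro h i hi
    have hb := congrArg (fun x => Nat.testBit x i) h
    simp only [Nat.testBit_div_two_pow, Nat.testBit_mod_two_pow, hi, decide_true,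
      Bool.true_and] at hb
    have h1 : Nat.testBit m (i + p) = Nat.testBit m i := hb
    simp only [Nat.testBit_eq_decide_div_mod_eq] at h1
    rcases Nat.mod_two_eq_zero_or_one (m / 2 ^ i) with h4 | h4 <;>
      rcases Nat.mod_two_eq_zero_or_one (m / 2 ^ (i + p)) with h3 | h3 <;>
      rw [h4, h3] at h1 ⊢ <;> simp at h1 ⊢
  · intro h
    apply Nat.eq_of_testBit_eq
    intro j
    rw [Nat.testBit_div_two_pow, Nat.testBit_mod_two_pow]
    by_cases hj : j < l - p
    · have hbit := h j hj
      simp only [Nat.testBit_eq_decide_div_mod_eq, hj, decide_true, Bool.true_and]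
      rw [hbit]
    · have h1 : m < 2 ^ (j + p) :=
        lt_of_lt_of_le hm (Nat.pow_le_pow_right (by omega) (by omega))
      rw [Nat.testBit_lt_two_pow h1]
      simp [hj]

theorem outer_eq (n : Int) (d : List Int) (l : Nat)
    (hcond : ∀ q, 1 ≤ q → q ≤ l →
      (solutionCheck d q 0 (l - q) = true ↔
        PySem.Int.floordiv n (2 ^ q) = PySem.Int.mod n (2 ^ (l - q)))) :
    ∀ p, p ≤ l → solutionOuter d l p = solutionAltLoop n l p := by
  intro p
  induction p with
  | zero => intro _; rfl
  | succ q IH =>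
    intro hple
    rw [solutionOuter, solutionAltLoop]
    by_cases hc : solutionCheck d (q + 1) 0 (l - (q + 1)) = true
    · rw [if_pos hc, if_pos ((hcond (q + 1) (by omega) hple).mp hc)]
    · rw [if_neg hc, if_neg (fun h => hc ((hcond (q + 1) (by omega) hple).mpr h)),
        IH (by omega)]

theorem solution_eq_alt (n : Int) (hpre : n < 1073741824) : solution n = solution_alt n := by
  by_cases hn : n ≤ 0
  · rw [solution, solution_alt, if_pos hn, solutionBuild, dif_neg (by omega)]
    show solutionOuter (List.replicate 30 0) 0 (0 / 2 + 1) = 1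
    have hc : solutionCheck (List.replicate 30 0) 1 0 (0 - 1) = true := by
      rw [solutionCheck, if_neg (by omega)]
    rw [show (0 : Nat) / 2 + 1 = 1 from rfl, solutionOuter, if_pos hc]
    norm_num
  · obtain ⟨m, rfl⟩ : ∃ m : Nat, n = (m : Int) := ⟨n.toNat, by omega⟩
    have hm1 : 1 ≤ m := by omega
    have hm30 : m < 1073741824 := by omega
    have hm30' : m < 2 ^ 30 := by norm_num at hm30 ⊢; omega
    rw [solution, solution_alt, if_neg (by omega)]
    have hmL : m < 2 ^ PySem.Int.bitLength (m : Int) := by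
      have h1 := PySem.Int.lt_two_pow_bitLength ((m : Nat) : Int)
      simpa using h1
    have hL1 : 1 ≤ PySem.Int.bitLength (m : Int) := by
      by_contra h
      have h0 : PySem.Int.bitLength (m : Int) = 0 := by omega
      rw [h0] at hmL
      omega
    have hL30 : PySem.Int.bitLength (m : Int) ≤ 30 := by
      have h1 := PySem.Int.two_pow_bitLength_le ((m : Nat) : Int)
        (Int.natCast_ne_zero.mpr (by omega))
      have h2 : 2 ^ (PySem.Int.bitLength (m : Int) - 1) ≤ m := by simpa using h1
      have h3 : 2 ^ (PySem.Int.bitLength (m : Int) - 1) < 2 ^ 30 := lt_of_le_of_lt h2 hm30'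
      have h4 := (Nat.pow_lt_pow_iff_right (a := 2) (by omega)).mp h3
      omega
    obtain ⟨hlen2, hlen1, hget⟩ := solutionBuild_spec m (List.replicate 30 0) 0
      (by rw [List.length_replicate]; omega)
    have hbits : ∀ i, i < PySem.Int.bitLength (m : Int) →
        (solutionBuild (m : Int) (List.replicate 30 0) 0).1.getD i 0
          = ((m / 2 ^ i % 2 : Nat) : Int) := by
      intro i hi
      rw [hget i, if_pos ⟨Nat.zero_le i, by omega⟩, Nat.sub_zero]
    rw [hlen2, Nat.zero_add]
    apply outer_eq
    · intro q hq1 hql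
      rw [solutionCheck_iff _ _ (PySem.Int.bitLength (m : Int) - q) 0
        (PySem.Int.bitLength (m : Int) - q) rfl]
      have hfd : PySem.Int.floordiv ((m : Nat) : Int) ((2 : Int) ^ q)
          = ((m / 2 ^ q : Nat) : Int) := by
        have he : ((2 : Int) ^ q) = ((2 ^ q : Nat) : Int) := by push_cast; ring
        rw [he]
        exact_mod_cast PySem.Int.floordiv_natCast m (2 ^ q)
      have hmd : PySem.Int.mod ((m : Nat) : Int) ((2 : Int) ^ (PySem.Int.bitLength (m : Int) - q))
          = ((m % 2 ^ (PySem.Int.bitLength (m : Int) - q) : Nat) : Int) := by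
        have he : ((2 : Int) ^ (PySem.Int.bitLength (m : Int) - q))
            = ((2 ^ (PySem.Int.bitLength (m : Int) - q) : Nat) : Int) := by push_cast; ring
        rw [he]
        exact_mod_cast PySem.Int.mod_natCast m (2 ^ (PySem.Int.bitLength (m : Int) - q))
      rw [hfd, hmd, Int.natCast_inj,
        period_arith m (PySem.Int.bitLength (m : Int)) q hmL hq1 hql]
      constructor
      · intro h i hi
        have e1 := h i (Nat.zero_le i) hi
        rw [hbits i (by omega), hbits (i + q) (by omega)] at e1
        exact_mod_cast e1
      · intro h j _ hj
        rw [hbits j (by omega), hbits (j + q) (by omega)]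
        exact_mod_cast h j hj
    · omega

-- ===== VERDICT (by name: the statement is the Claim_ definition above) =====
theorem solution_spec : Claim_equal_solution := by
  intro n _ hpre
  unfold Spec_solution
  exact solution_eq_alt n hpre
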